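-- pv_equiv track=rewrite | github.com/aerovfx/Fullstack4kid | CREATE_APP/Python/PythonStudy/BoiBoistudy/Python_basic/python_nangcao/DE28/Sapxep.py | sap_xep
-- ===== SOURCE A (Python) =====
-- def sap_xep(A):
--     chia_7 = []
--     chia_5 = []
--     other_nums = []
--
--     for num in A:
--         if num % 7 == 0:
--             chia_7.append(num)
--         elif num % 5 == 0:
--             chia_5.append(num)
--         else:
--             other_nums.append(num)
--
--     sorted_nums = sorted(chia_7) + sorted(other_nums) + sorted(chia_5)
--     return sorted_nums
-- ===== SOURCE B (Python) =====
-- def sap_xep(A):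
--     def key(num):
--         if num % 7 == 0:
--             r = 0
--         elif num % 5 == 0:
--             r = 2
--         else:
--             r = 1
--         return (r, num)
--     return sorted(A, key=key)
-- ===== Notes on version B (the rewrite author's own statement) =====
-- stated objective: idiomatic
-- what changed: Replaced the partition-into-three-lists pass plus three separate sorts by a single sorted() call with a composite (group_rank, value) key encoding the 7/other/5 group order.
import Mathlib
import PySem

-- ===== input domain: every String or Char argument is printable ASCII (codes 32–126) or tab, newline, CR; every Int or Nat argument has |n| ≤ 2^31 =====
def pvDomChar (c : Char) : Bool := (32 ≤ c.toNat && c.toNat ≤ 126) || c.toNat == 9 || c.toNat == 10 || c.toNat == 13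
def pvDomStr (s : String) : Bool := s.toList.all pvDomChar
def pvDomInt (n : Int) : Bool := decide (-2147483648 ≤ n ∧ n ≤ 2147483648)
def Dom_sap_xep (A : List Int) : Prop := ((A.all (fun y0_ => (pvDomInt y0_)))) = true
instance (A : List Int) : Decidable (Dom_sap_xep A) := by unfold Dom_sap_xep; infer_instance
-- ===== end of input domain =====

-- B replaces A's partition-into-three-lists pass plus three sorts by one sorted() with a
-- composite (group_rank, value) key; objective: idiomatic, same asymptotic cost.

-- ===== PORT A =====
def sap_xep (A : List Int) : List Int :=
  let st := A.foldl (fun (st : List Int × List Int × List Int) num =>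
    if PySem.Int.mod num 7 == 0 then (st.1 ++ [num], st.2.1, st.2.2)
    else if PySem.Int.mod num 5 == 0 then (st.1, st.2.1, st.2.2 ++ [num])
    else (st.1, st.2.1 ++ [num], st.2.2)) ([], [], [])
  PySem.List.sorted st.1 (fun x => x) ++ PySem.List.sorted st.2.1 (fun x => x)
    ++ PySem.List.sorted st.2.2 (fun x => x)

-- ===== PORT B =====
-- the if/elif/else computing r in Source B's key
def pvRank (num : Int) : Int :=
  if PySem.Int.mod num 7 == 0 then 0
  else if PySem.Int.mod num 5 == 0 then 2
  else 1

def sap_xep_alt (A : List Int) : List Int :=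
  PySem.List.sorted2 A pvRank (fun num => num)

-- ===== PRECONDITION & SPEC =====
def Spec_sap_xep (A : List Int) (out : List Int) : Prop := out = sap_xep_alt A
instance (A : List Int) (out : List Int) : Decidable (Spec_sap_xep A out) := by unfold Spec_sap_xep; infer_instance

-- ===== CLAIM (what is proved, stated in full; the proofs are below) =====
def Claim_equal_sap_xep : Prop := ∀ (A : List Int), Dom_sap_xep A → Spec_sap_xep A (sap_xep A)

-- ===== LEMMAS AND PROOFS =====

-- the composite key, as a lexicographically ordered pair
def pvKey (x : Int) : Lex (Int × Int) := toLex (pvRank x, x)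

theorem pvKey_injective : Function.Injective pvKey := by
  intro a b h
  have := congrArg (fun p => (ofLex p).2) h
  simpa [pvKey] using this

theorem pvCmp_eq (a b : Int) :
    (decide (pvRank a < pvRank b) || (!decide (pvRank b < pvRank a) && decide (a < b)))
      = decide (pvKey a < pvKey b) := by
  have h : (pvKey a < pvKey b) ↔ (pvRank a < pvRank b ∨ (pvRank a = pvRank b ∧ a < b)) := by
    simp [pvKey, Prod.Lex.lt_iff]
  by_cases h1 : pvRank a < pvRank b <;> by_cases h2 : pvRank b < pvRank a <;>
    by_cases h3 : a < b <;> simp [h1, h2, h3, h] <;> omega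

theorem sap_xep_alt_eq_sorted (A : List Int) :
    sap_xep_alt A = PySem.List.sorted A pvKey := by
  rw [PySem.List.sorted_eq_foldl_insertBy]
  show A.foldl (fun acc x => PySem.List.insertBy
      (fun a b => decide (pvRank a < pvRank b) || (!decide (pvRank b < pvRank a) && decide (a < b)))
      x acc) [] = _
  rw [show (fun (acc : List Int) x => PySem.List.insertBy
      (fun a b => decide (pvRank a < pvRank b) || (!decide (pvRank b < pvRank a) && decide (a < b))) x acc)
     = (fun acc x => PySem.List.insertBy (fun a b => decide (pvKey a < pvKey b)) x acc) from by
    funext acc x; rw [show (fun a b : Int => decide (pvRank a < pvRank b) || (!decide (pvRank b < pvRank a) && decide (a < b))) = (fun a b => decide (pvKey a < pvKey b)) from by funext a b; exact pvCmp_eq a b]]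

-- the partition loop computes the three filters
def pvP7 (x : Int) : Bool := PySem.Int.mod x 7 == 0
def pvP5 (x : Int) : Bool := !pvP7 x && PySem.Int.mod x 5 == 0
def pvPo (x : Int) : Bool := !pvP7 x && !(PySem.Int.mod x 5 == 0)

theorem pv_partition (A : List Int) (c7 o c5 : List Int) :
    A.foldl (fun (st : List Int × List Int × List Int) num =>
      if PySem.Int.mod num 7 == 0 then (st.1 ++ [num], st.2.1, st.2.2)
      else if PySem.Int.mod num 5 == 0 then (st.1, st.2.1, st.2.2 ++ [num])
      else (st.1, st.2.1 ++ [num], st.2.2)) (c7, o, c5)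
    = (c7 ++ A.filter pvP7, o ++ A.filter pvPo, c5 ++ A.filter pvP5) := by
  induction A generalizing c7 o c5 with
  | nil => simp
  | cons x xs ih =>
    rw [List.foldl_cons]
    by_cases h7 : (PySem.Int.mod x 7 == 0) = true
    · rw [if_pos h7, ih]
      have hp7 : pvP7 x = true := h7
      have hpo : pvPo x = false := by simp [pvPo, hp7]
      have hp5 : pvP5 x = false := by simp [pvP5, hp7]
      simp [hp7, hpo, hp5]
    · have hp7 : pvP7 x = false := by
        simp only [pvP7]; exact Bool.eq_false_iff.mpr h7
      rw [if_neg h7]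
      by_cases h5 : (PySem.Int.mod x 5 == 0) = true
      · rw [if_pos h5, ih]
        have hd5 : (5 : Int) ∣ x := by simpa using h5
        have hpo : pvPo x = false := by simp [pvPo, hd5]
        have hp5 : pvP5 x = true := by simp [pvP5, hp7, hd5]
        simp [hp7, hpo, hp5]
      · rw [if_neg h5, ih]
        have hd5 : ¬ (5 : Int) ∣ x := by simpa using h5
        have hpo : pvPo x = true := by simp [pvPo, hp7, hd5]
        have hp5 : pvP5 x = false := by simp [pvP5, hd5]
        simp [hp7, hpo, hp5]

theorem pv_perm (A : List Int) :
    (A.filter pvP7 ++ A.filter pvPo ++ A.filter pvP5).Perm A := by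
  have h1 := List.filter_append_perm pvP7 A
  have h2 := List.filter_append_perm (fun x => PySem.Int.mod x 5 == 0) (A.filter (fun x => !pvP7 x))
  rw [List.filter_filter, List.filter_filter] at h2
  have e5 : (fun a => ((PySem.Int.mod a 5 == 0) && !pvP7 a)) = pvP5 := by
    funext a; simp [pvP5, Bool.and_comm]
  have eo : (fun a => ((!(PySem.Int.mod a 5 == 0)) && !pvP7 a)) = pvPo := by
    funext a; simp [pvPo, Bool.and_comm]
  rw [e5, eo] at h2
  refine List.Perm.trans ?_ h1
  refine List.Perm.trans ?_ (List.Perm.append_left _ h2)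
  rw [List.append_assoc]
  exact List.Perm.append_left _ List.perm_append_comm

theorem pv_rank_of_p7 {x : Int} (h : pvP7 x = true) : pvRank x = 0 := by
  simp [pvP7] at h; simp [pvRank, h]
theorem pv_rank_of_po {x : Int} (h : pvPo x = true) : pvRank x = 1 := by
  simp [pvPo, pvP7] at h; simp [pvRank, h.1, h.2]
theorem pv_rank_of_p5 {x : Int} (h : pvP5 x = true) : pvRank x = 2 := by
  simp [pvP5, pvP7] at h; simp [pvRank, h.1, h.2]

-- a sorted block of constant rank is key-pairwise
theorem pv_block_pairwise (l : List Int) (p : Int → Bool) (r : Int)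
    (hr : ∀ x, p x = true → pvRank x = r) :
    List.Pairwise (fun a b => pvKey a ≤ pvKey b) (PySem.List.sorted (l.filter p) (fun x => x)) := by
  refine (PySem.List.sorted_pairwise (l.filter p) (fun x => x)).imp_of_mem ?_
  intro a b ha hb hab
  rw [PySem.List.mem_sorted] at ha hb
  have ra := hr a (List.of_mem_filter ha)
  have rb := hr b (List.of_mem_filter hb)
  rw [pvKey, pvKey, Prod.Lex.le_iff]
  right
  constructor
  · simp [ra, rb]
  · simpa using hab

theorem pv_cross {x y : Int} (h : pvRank x < pvRank y) : pvKey x ≤ pvKey y := by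
  rw [pvKey, pvKey, Prod.Lex.le_iff]; left; simpa using h

theorem pv_a_pairwise (A : List Int) :
    List.Pairwise (fun a b => pvKey a ≤ pvKey b)
      (PySem.List.sorted (A.filter pvP7) (fun x => x) ++ PySem.List.sorted (A.filter pvPo) (fun x => x)
        ++ PySem.List.sorted (A.filter pvP5) (fun x => x)) := by
  rw [List.append_assoc, List.pairwise_append, List.pairwise_append]
  refine ⟨pv_block_pairwise A pvP7 0 (fun x => pv_rank_of_p7), ?_, ?_⟩
  · refine ⟨pv_block_pairwise A pvPo 1 (fun x => pv_rank_of_po),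
      pv_block_pairwise A pvP5 2 (fun x => pv_rank_of_p5), ?_⟩
    intro a ha b hb
    rw [PySem.List.mem_sorted] at ha hb
    exact pv_cross (by rw [pv_rank_of_po (List.of_mem_filter ha), pv_rank_of_p5 (List.of_mem_filter hb)]; norm_num)
  · intro a ha b hb
    rw [PySem.List.mem_sorted] at ha
    rw [List.mem_append, PySem.List.mem_sorted, PySem.List.mem_sorted] at hb
    have ra := pv_rank_of_p7 (List.of_mem_filter ha)
    rcases hb with hb | hb
    · exact pv_cross (by rw [ra, pv_rank_of_po (List.of_mem_filter hb)]; norm_num)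
    · exact pv_cross (by rw [ra, pv_rank_of_p5 (List.of_mem_filter hb)]; norm_num)

-- ===== VERDICT (by name: the statement is the Claim_ definition above) =====
theorem sap_xep_spec : Claim_equal_sap_xep := by
  intro A _
  show sap_xep A = sap_xep_alt A
  rw [sap_xep_alt_eq_sorted]
  unfold sap_xep
  rw [pv_partition A [] [] []]
  simp only [List.nil_append]
  refine PySem.List.eq_of_perm_of_pairwise_le_of_injective pvKey pvKey_injective
    ?_ (pv_a_pairwise A) (PySem.List.sorted_pairwise A pvKey)
  refine List.Perm.trans ?_ ((PySem.List.sorted_perm A pvKey false).symm)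
  refine List.Perm.trans ?_ (pv_perm A)
  exact List.Perm.append (List.Perm.append (PySem.List.sorted_perm _ _ _)
    (PySem.List.sorted_perm _ _ _)) (PySem.List.sorted_perm _ _ _)
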